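-- pv_equiv track=rewrite | github.com/Ed-von-Schleck/gnitz | py_client/tests/test_tpch_incremental.py | _build_cust_prices
-- ===== SOURCE A (Python) =====
-- def _build_cust_prices(lineitem_data, orders_data):
--     """Compute per-customer list of total_prices from raw data."""
--     order_to_cust = {o[0]: o[1] for o in orders_data}
--     li_agg = {}
--     for pk, okey, qty, price in lineitem_data:
--         li_agg[okey] = li_agg.get(okey, 0) + price
--
--     cust_prices = {}
--     for okey, total_price in li_agg.items():
--         ckey = order_to_cust.get(okey)
--         if ckey is not None:
--             cust_prices.setdefault(ckey, []).append((okey, total_price))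
--     return cust_prices
-- ===== SOURCE B (Python) =====
-- def _build_cust_prices(lineitem_data, orders_data):
--     """Compute per-customer list of total_prices from raw data."""
--     order_to_cust = {o[0]: o[1] for o in orders_data}
--     agg = {}
--     for pk, okey, qty, price in lineitem_data:
--         ckey = order_to_cust.get(okey)
--         if ckey is None:
--             continue
--         inner = agg.setdefault(ckey, {})
--         inner[okey] = inner.get(okey, 0) + price
--     return {ckey: list(inner.items()) for ckey, inner in agg.items()}
-- ===== Notes on version B (the rewrite author's own statement) =====
-- stated objective: simpler
-- what changed: B fuses A's two passes (aggregate per-order totals into li_agg, then group the aggregated pairs by customer) into a single pass over lineitem_data that maintains a nested dict customer -> (order -> running total), dropping the intermediate li_agg dict; the result is read off as {ckey: list(inner.items())}.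
import Mathlib
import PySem

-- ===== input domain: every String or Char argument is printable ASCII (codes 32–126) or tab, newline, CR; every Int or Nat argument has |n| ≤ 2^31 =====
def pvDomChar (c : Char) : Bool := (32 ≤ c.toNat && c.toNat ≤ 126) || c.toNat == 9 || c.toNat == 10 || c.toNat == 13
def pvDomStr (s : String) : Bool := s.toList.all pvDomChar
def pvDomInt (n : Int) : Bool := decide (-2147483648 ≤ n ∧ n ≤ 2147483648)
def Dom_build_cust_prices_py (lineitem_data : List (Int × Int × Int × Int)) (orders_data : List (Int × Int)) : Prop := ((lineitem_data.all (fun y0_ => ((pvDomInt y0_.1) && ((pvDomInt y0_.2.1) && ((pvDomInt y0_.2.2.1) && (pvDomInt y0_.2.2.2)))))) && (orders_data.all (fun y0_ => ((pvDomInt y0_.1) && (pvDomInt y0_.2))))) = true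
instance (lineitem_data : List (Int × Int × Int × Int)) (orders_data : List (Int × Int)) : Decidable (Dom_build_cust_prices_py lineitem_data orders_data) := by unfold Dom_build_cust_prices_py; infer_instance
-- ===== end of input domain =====

-- ===== PORT A =====
-- Port of A: aggregate prices per order into li_agg, then a second pass groups
-- the aggregated (okey, total) pairs under their customers.
def build_cust_prices_py (lineitem_data : List (Int × Int × Int × Int)) (orders_data : List (Int × Int)) : List (Int × List (Int × Int)) :=
  let order_to_cust : PySem.Dict Int Int :=
    orders_data.foldl (fun d o => d.insert o.1 o.2) PySem.Dict.empty
  let li_agg : PySem.Dict Int Int :=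
    lineitem_data.foldl (fun d r => d.modify r.2.1 0 (· + r.2.2.2)) PySem.Dict.empty
  let cust_prices : PySem.Dict Int (List (Int × Int)) :=
    li_agg.items.foldl (fun d p =>
      match order_to_cust.get? p.1 with
      | none => d
      | some ckey => d.modify ckey [] (· ++ [(p.1, p.2)])) PySem.Dict.empty
  cust_prices.items

-- ===== PORT B =====
-- Port of B: one fused pass over lineitem_data maintaining a nested dict
-- customer -> (order -> running total); the intermediate li_agg dict disappears.
def build_cust_prices_py_alt (lineitem_data : List (Int × Int × Int × Int)) (orders_data : List (Int × Int)) : List (Int × List (Int × Int)) :=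
  let order_to_cust : PySem.Dict Int Int :=
    orders_data.foldl (fun d o => d.insert o.1 o.2) PySem.Dict.empty
  let agg : PySem.Dict Int (PySem.Dict Int Int) :=
    lineitem_data.foldl (fun g r =>
      match order_to_cust.get? r.2.1 with
      | none => g
      | some ckey => g.modify ckey PySem.Dict.empty
          (fun inner => inner.modify r.2.1 0 (· + r.2.2.2)))
      PySem.Dict.empty
  agg.items.map (fun p => (p.1, p.2.items))

-- ===== PRECONDITION & SPEC =====
def Spec_build_cust_prices_py (lineitem_data : List (Int × Int × Int × Int)) (orders_data : List (Int × Int)) (out : List (Int × List (Int × Int))) : Prop := out = build_cust_prices_py_alt lineitem_data orders_data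
instance (lineitem_data : List (Int × Int × Int × Int)) (orders_data : List (Int × Int)) (out : List (Int × List (Int × Int))) : Decidable (Spec_build_cust_prices_py lineitem_data orders_data out) := by unfold Spec_build_cust_prices_py; infer_instance

-- ===== CLAIM (what is proved, stated in full; the proofs are below) =====
def Claim_equal_build_cust_prices_py : Prop := ∀ (lineitem_data : List (Int × Int × Int × Int)) (orders_data : List (Int × Int)), Dom_build_cust_prices_py lineitem_data orders_data → Spec_build_cust_prices_py lineitem_data orders_data (build_cust_prices_py lineitem_data orders_data)

-- ===== LEMMAS AND PROOFS =====

-- the body of a loop that skips rows on which `f` is `none`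
def skipStep {α β σ : Type} (f : α → Option β) (step : σ → β → σ) : σ → α → σ :=
  fun s a => match f a with | none => s | some b => step s b

-- L1: a fold that skips `none` is a fold over the filterMap
theorem foldl_match_filterMap {α β σ : Type} (f : α → Option β) (step : σ → β → σ) :
    ∀ (l : List α) (s : σ),
      l.foldl (skipStep f step) s = (l.filterMap f).foldl step s := by
  intro l
  induction l with
  | nil => intro s; rfl
  | cons a l ih =>
    intro s
    cases h : f a <;> simp [skipStep, h, ih]

-- L2: reading one key of a keyed modify-fold sees exactly the matching elements
theorem getD_foldl_modify_filter {κ ν α : Type} [BEq κ] [LawfulBEq κ] [DecidableEq κ]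
    (key : α → κ) (d0 : ν) (f : α → ν → ν) :
    ∀ (l : List α) (g : PySem.Dict κ ν) (c : κ),
      (l.foldl (fun g q => g.modify (key q) d0 (f q)) g).getD c d0
        = (l.filter (fun q => key q == c)).foldl (fun v q => f q v) (g.getD c d0) := by
  intro l
  induction l with
  | nil => intros; rfl
  | cons a l ih =>
    intro g c
    simp only [List.foldl_cons, ih, List.filter_cons]
    by_cases h : key a = c
    · simp [h]
    · simp [h, PySem.Dict.getD_modify, Ne.symm h]

-- K1: dedup-before-filterMap does not change the dedup of the filterMap
theorem ofList_filterMap_ofList {α β : Type} [BEq α] [LawfulBEq α] [BEq β] [LawfulBEq β]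
    (g : α → Option β) (M : List α) :
    PySem.Set.ofList ((PySem.Set.ofList M).filterMap g) = PySem.Set.ofList (M.filterMap g) := by
  induction M using List.reverseRecOn with
  | nil => rfl
  | append_singleton M x ih =>
    rw [PySem.Set.ofList_append_singleton]
    by_cases hx : x ∈ PySem.Set.ofList M
    · rw [PySem.Set.add_of_mem hx, ih, List.filterMap_append]
      cases hgx : g x with
      | none => simp [hgx]
      | some c =>
        have hc : c ∈ M.filterMap g :=
          List.mem_filterMap.2 ⟨x, (PySem.Set.mem_ofList M x).1 hx, hgx⟩
        simp [hgx, PySem.Set.ofList_append_singleton,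
          PySem.Set.add_of_mem ((PySem.Set.mem_ofList _ _).2 hc)]
    · rw [PySem.Set.add_of_not_mem hx, List.filterMap_append, List.filterMap_append,
        PySem.Set.ofList_append, PySem.Set.ofList_append, ih]

-- K2: filter commutes with dedup
theorem filter_ofList {α : Type} [BEq α] [LawfulBEq α] (p : α → Bool) (M : List α) :
    (PySem.Set.ofList M).filter p = PySem.Set.ofList (M.filter p) := by
  induction M using List.reverseRecOn with
  | nil => rfl
  | append_singleton M x ih =>
    rw [PySem.Set.ofList_append_singleton]
    by_cases hx : x ∈ PySem.Set.ofList M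
    · rw [PySem.Set.add_of_mem hx, ih, List.filter_append]
      cases hpx : p x with
      | false => simp [hpx]
      | true =>
        have hm : x ∈ M.filter p :=
          List.mem_filter.2 ⟨(PySem.Set.mem_ofList M x).1 hx, hpx⟩
        simp [hpx, PySem.Set.ofList_append_singleton,
          PySem.Set.add_of_mem ((PySem.Set.mem_ofList _ _).2 hm)]
    · have hx' : x ∉ M := fun h => hx ((PySem.Set.mem_ofList M x).2 h)
      rw [PySem.Set.add_of_not_mem hx, List.filter_append, List.filter_append, ih]
      cases hpx : p x with
      | false => simp [hpx]
      | true =>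
        have hx2 : x ∉ M.filter p := fun h => hx' (List.mem_filter.1 h).1
        rw [show List.filter p [x] = [x] by simp [hpx],
          PySem.Set.ofList_append_singleton, PySem.Set.add_of_not_mem
            (fun h => hx2 ((PySem.Set.mem_ofList _ _).1 h))]

-- A-side helper: project the grouped pairs out of the filterMap
theorem H1 (m : PySem.Dict Int Int) (t : Int → Int) (c : Int) :
    ∀ (S' : List Int),
      (((S'.filterMap (fun k => (m.get? k).map (fun c' => (c', (k, t k))))).filter
          (fun p => p.1 == c)).map (fun p => p.2))
        = (S'.filter (fun k => m.get? k == some c)).map (fun k => (k, t k)) := by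
  intro S'
  induction S' with
  | nil => rfl
  | cons k S' ih =>
    cases hg : m.get? k with
    | none => simp [hg, ih]
    | some c' =>
      by_cases hc : c' = c
      · simp [hg, hc, ih]
      · simp [hg, hc, ih]

-- B-side helper: the rows of one customer
theorem H2 (m : PySem.Dict Int Int) (c : Int) :
    ∀ (li : List (Int × Int × Int × Int)),
      ((li.filterMap (fun r => (m.get? r.2.1).map (fun c' => (c', (r.2.1, r.2.2.2))))).filter
          (fun q => q.1 == c))
        = (li.filter (fun r => m.get? r.2.1 == some c)).map (fun r => (c, (r.2.1, r.2.2.2))) := by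
  intro li
  induction li with
  | nil => rfl
  | cons r li ih =>
    cases hg : m.get? r.2.1 with
    | none => simp [hg, ih]
    | some c' =>
      by_cases hc : c' = c
      · simp [hg, hc, ih]
      · simp [hg, hc, ih]

theorem main_items (m : PySem.Dict Int Int) (li : List (Int × Int × Int × Int)) :
    (((li.foldl (fun d r => d.modify r.2.1 0 (· + r.2.2.2)) PySem.Dict.empty).items).foldl
        (fun d p => match m.get? p.1 with
          | none => d
          | some ckey => d.modify ckey [] (· ++ [(p.1, p.2)])) PySem.Dict.empty).items
      =
    ((li.foldl (fun g r => match m.get? r.2.1 with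
          | none => g
          | some ckey => g.modify ckey PySem.Dict.empty
              (fun inner => inner.modify r.2.1 0 (· + r.2.2.2))) PySem.Dict.empty).items).map
        (fun p => (p.1, p.2.items)) := by
  -- names
  set M : List Int := li.map (fun r => r.2.1) with hM
  set t : Int → Int := fun k => ((li.filter (fun r => r.2.1 == k)).map (fun r => r.2.2.2)).sum with ht
  set li_agg := li.foldl (fun d r => d.modify r.2.1 0 (· + r.2.2.2)) PySem.Dict.empty with hli_agg
  -- li_agg facts
  have hkeys_agg : li_agg.keys = PySem.Set.ofList M := by
    rw [hli_agg]
    have := PySem.Dict.keys_foldl_modify_key li (fun r => r.2.1) 0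
      (fun _ r v => v + r.2.2.2) PySem.Dict.empty
    simpa [PySem.Dict.keys_empty, PySem.Set.update_nil_left] using this
  have hnodup_agg : li_agg.keys.Nodup := by
    rw [hli_agg]
    exact PySem.Dict.nodup_keys_foldl_modify_key li (fun r => r.2.1) 0
      (fun _ r v => v + r.2.2.2) PySem.Dict.empty (by simp [PySem.Dict.keys_empty])
  have hgetD_agg : ∀ k, li_agg.getD k 0 = t k := by
    intro k
    rw [hli_agg]
    have := getD_foldl_modify_filter (fun r : Int × Int × Int × Int => r.2.1) 0
      (fun r v => v + r.2.2.2) li PySem.Dict.empty k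
    rw [this]
    simp [PySem.Dict.getD_empty, PySem.List.foldl_add, ht]
  have hitems_agg : li_agg.items = (PySem.Set.ofList M).map (fun k => (k, t k)) := by
    rw [PySem.Dict.items_eq_map_keys li_agg hnodup_agg 0, hkeys_agg]
    exact List.map_congr_left (fun k _ => by rw [hgetD_agg])
  -- rewrite the two skip-folds through filterMap
  have hAfun : (fun (d : PySem.Dict Int (List (Int × Int))) (p : Int × Int) =>
        match m.get? p.1 with
        | none => d
        | some ckey => d.modify ckey [] (· ++ [(p.1, p.2)]))
      = skipStep (fun p : Int × Int => (m.get? p.1).map (fun c => (c, (p.1, p.2))))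
          (fun d q => d.modify q.1 [] (· ++ [q.2])) := by
    funext d p; cases hp : m.get? p.1 <;> simp [skipStep, hp]
  have hBfun : (fun (g : PySem.Dict Int (PySem.Dict Int Int)) (r : Int × Int × Int × Int) =>
        match m.get? r.2.1 with
        | none => g
        | some ckey => g.modify ckey PySem.Dict.empty
            (fun inner => inner.modify r.2.1 0 (· + r.2.2.2)))
      = skipStep (fun r : Int × Int × Int × Int => (m.get? r.2.1).map (fun c => (c, (r.2.1, r.2.2.2))))
          (fun g q => g.modify q.1 PySem.Dict.empty
            (fun inner => inner.modify q.2.1 0 (· + q.2.2))) := by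
    funext g r; cases hr : m.get? r.2.1 <;> simp [skipStep, hr]
  have hfoldA : li_agg.items.foldl
        (fun d p => match m.get? p.1 with
          | none => d
          | some ckey => d.modify ckey [] (· ++ [(p.1, p.2)])) PySem.Dict.empty
      = (li_agg.items.filterMap
          (fun p : Int × Int => (m.get? p.1).map (fun c => (c, (p.1, p.2))))).foldl
          (fun d q => d.modify q.1 [] (· ++ [q.2])) PySem.Dict.empty := by
    rw [hAfun]
    exact foldl_match_filterMap
      (fun p : Int × Int => (m.get? p.1).map (fun c => (c, (p.1, p.2))))
      (fun d q => d.modify q.1 [] (· ++ [q.2])) li_agg.items PySem.Dict.empty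
  have hfoldB : li.foldl
        (fun g r => match m.get? r.2.1 with
          | none => g
          | some ckey => g.modify ckey PySem.Dict.empty
              (fun inner => inner.modify r.2.1 0 (· + r.2.2.2))) PySem.Dict.empty
      = (li.filterMap
          (fun r : Int × Int × Int × Int => (m.get? r.2.1).map (fun c => (c, (r.2.1, r.2.2.2))))).foldl
          (fun g q => g.modify q.1 PySem.Dict.empty
            (fun inner => inner.modify q.2.1 0 (· + q.2.2))) PySem.Dict.empty := by
    rw [hBfun]
    exact foldl_match_filterMap
      (fun r : Int × Int × Int × Int => (m.get? r.2.1).map (fun c => (c, (r.2.1, r.2.2.2))))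
      (fun g q => g.modify q.1 PySem.Dict.empty
        (fun inner => inner.modify q.2.1 0 (· + q.2.2))) li PySem.Dict.empty
  rw [hfoldA, hfoldB]
  set LA := li_agg.items.filterMap
      (fun p : Int × Int => (m.get? p.1).map (fun c => (c, (p.1, p.2)))) with hLA
  set LB := li.filterMap
      (fun r : Int × Int × Int × Int => (m.get? r.2.1).map (fun c => (c, (r.2.1, r.2.2.2)))) with hLB
  set DA := LA.foldl (fun d q => d.modify q.1 [] (· ++ [q.2])) PySem.Dict.empty with hDA
  set DB := LB.foldl (fun g q => g.modify q.1 PySem.Dict.empty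
      (fun inner => inner.modify q.2.1 0 (· + q.2.2))) PySem.Dict.empty with hDB
  -- keys of the two result dicts
  have hDAkeys : DA.keys = PySem.Set.ofList (LA.map (fun q => q.1)) := by
    rw [hDA]
    have := PySem.Dict.keys_foldl_modify_key LA (fun q : Int × Int × Int => q.1) []
      (fun _ q v => v ++ [q.2]) PySem.Dict.empty
    simpa [PySem.Dict.keys_empty, PySem.Set.update_nil_left] using this
  have hDBkeys : DB.keys = PySem.Set.ofList (LB.map (fun q => q.1)) := by
    rw [hDB]
    have := PySem.Dict.keys_foldl_modify_key LB (fun q : Int × Int × Int => q.1)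
      PySem.Dict.empty (fun _ q inner => inner.modify q.2.1 0 (· + q.2.2)) PySem.Dict.empty
    simpa [PySem.Dict.keys_empty, PySem.Set.update_nil_left] using this
  have hDAnodup : DA.keys.Nodup := by
    rw [hDA]
    exact PySem.Dict.nodup_keys_foldl_modify_key LA (fun q : Int × Int × Int => q.1) []
      (fun _ q v => v ++ [q.2]) PySem.Dict.empty (by simp [PySem.Dict.keys_empty])
  have hDBnodup : DB.keys.Nodup := by
    rw [hDB]
    exact PySem.Dict.nodup_keys_foldl_modify_key LB (fun q : Int × Int × Int => q.1)
      PySem.Dict.empty (fun _ q inner => inner.modify q.2.1 0 (· + q.2.2)) PySem.Dict.empty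
      (by simp [PySem.Dict.keys_empty])
  -- the two key lists coincide
  have hkeysAB : DA.keys = DB.keys := by
    rw [hDAkeys, hDBkeys]
    have h1 : LA.map (fun q => q.1) = (PySem.Set.ofList M).filterMap (fun k => m.get? k) := by
      rw [hLA, hitems_agg, List.filterMap_map, List.map_filterMap]
      simp [Function.comp_def, Option.map_map, Option.map_id']
    have h2 : LB.map (fun q => q.1) = M.filterMap (fun k => m.get? k) := by
      rw [hLB, List.map_filterMap, hM, List.filterMap_map]
      simp [Function.comp_def, Option.map_map, Option.map_id']
    rw [h1, h2]
    exact ofList_filterMap_ofList (fun k => m.get? k) M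
  -- per-customer values
  have hvalA : ∀ c, DA.getD c []
      = ((PySem.Set.ofList M).filter (fun k => m.get? k == some c)).map (fun k => (k, t k)) := by
    intro c
    rw [hDA, PySem.Dict.getD_foldl_modify_append LA PySem.Dict.empty c,
      PySem.Dict.getD_empty, List.nil_append, hLA, hitems_agg, List.filterMap_map]
    have h1 := H1 m t c (PySem.Set.ofList M)
    rw [← h1]
    simp
  have hvalB : ∀ c, (DB.getD c PySem.Dict.empty).items
      = ((PySem.Set.ofList M).filter (fun k => m.get? k == some c)).map (fun k => (k, t k)) := by
    intro c
    have hg := getD_foldl_modify_filter (fun q : Int × Int × Int => q.1) PySem.Dict.empty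
      (fun q inner => inner.modify q.2.1 0 (· + q.2.2)) LB PySem.Dict.empty c
    rw [hDB, hg, PySem.Dict.getD_empty]
    have hrows : LB.filter (fun q => q.1 == c)
        = (li.filter (fun r => m.get? r.2.1 == some c)).map (fun r => (c, (r.2.1, r.2.2.2))) := by
      rw [hLB]; exact H2 m c li
    rw [hrows, List.foldl_map]
    set rows := li.filter (fun r => m.get? r.2.1 == some c) with hrows2
    -- the inner dictionary of customer c
    set Dc := rows.foldl (fun inner r => inner.modify r.2.1 0 (· + r.2.2.2)) PySem.Dict.empty
      with hDc
    have hDckeys : Dc.keys = PySem.Set.ofList (rows.map (fun r => r.2.1)) := by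
      rw [hDc]
      have := PySem.Dict.keys_foldl_modify_key rows (fun r : Int × Int × Int × Int => r.2.1) 0
        (fun _ r v => v + r.2.2.2) PySem.Dict.empty
      simpa [PySem.Dict.keys_empty, PySem.Set.update_nil_left] using this
    have hDcnodup : Dc.keys.Nodup := by
      rw [hDc]
      exact PySem.Dict.nodup_keys_foldl_modify_key rows (fun r : Int × Int × Int × Int => r.2.1) 0
        (fun _ r v => v + r.2.2.2) PySem.Dict.empty (by simp [PySem.Dict.keys_empty])
    have hkeysDc : Dc.keys = (PySem.Set.ofList M).filter (fun k => m.get? k == some c) := by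
      rw [hDckeys, filter_ofList, hM, List.filter_map]
      simp only [Function.comp_def]
      rw [← hrows2]
    have : Dc.items = Dc.keys.map (fun k => (k, Dc.getD k 0)) :=
      PySem.Dict.items_eq_map_keys Dc hDcnodup 0
    rw [this, hkeysDc]
    apply List.map_congr_left
    intro k hk
    have hkc : (m.get? k == some c) = true := (List.mem_filter.1 hk).2
    have hgk : Dc.getD k 0 = t k := by
      rw [hDc]
      have := getD_foldl_modify_filter (fun r : Int × Int × Int × Int => r.2.1) 0
        (fun r v => v + r.2.2.2) rows PySem.Dict.empty k
      rw [this, PySem.Dict.getD_empty, PySem.List.foldl_add, hrows2, List.filter_filter, ht]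
      have hcong : ∀ r ∈ li, ((r.2.1 == k) && (m.get? r.2.1 == some c)) = (r.2.1 == k) := by
        intro r _
        by_cases h : r.2.1 = k
        · simp [h, hkc]
        · simp [h]
      rw [List.filter_congr hcong]
      simp
    rw [hgk]
  -- assemble
  have hDAitems : DA.items = DA.keys.map (fun c => (c, DA.getD c [])) :=
    PySem.Dict.items_eq_map_keys DA hDAnodup []
  have hDBitems : DB.items = DB.keys.map (fun c => (c, DB.getD c PySem.Dict.empty)) :=
    PySem.Dict.items_eq_map_keys DB hDBnodup PySem.Dict.empty
  rw [hDAitems, hDBitems, List.map_map, hkeysAB]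
  apply List.map_congr_left
  intro c _
  simp only [Function.comp_apply]
  rw [hvalA c, hvalB c]

-- ===== VERDICT (by name: the statement is the Claim_ definition above) =====
theorem build_cust_prices_py_spec : Claim_equal_build_cust_prices_py := by
  intro lineitem_data orders_data _
  unfold Spec_build_cust_prices_py build_cust_prices_py build_cust_prices_py_alt
  exact main_items (orders_data.foldl (fun d o => d.insert o.1 o.2) PySem.Dict.empty)
    lineitem_data
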